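-- pv_equiv track=rewrite | github.com/veerendra-poosala/ccbpCodes | ccbp_codes/coding_practice_28/kSumPairs.py | k_sum_pairs
-- ===== SOURCE A (Python) =====
-- def k_sum_pairs(int_list,number_k):
--
--     stop_index = len(int_list) - 1
--     result_set = set()
--
--     for cur_index in range(stop_index):
--         num_1 = int_list[cur_index]
--         num_2 = number_k - num_1
--         remaining_list = int_list[cur_index:]
--         if num_2 in remaining_list:
--             new_elements = (num_1,num_2)
--             new_sets = list(new_elements)
--             new_sets = tuple(sorted(new_sets))
--             result_set.add(new_sets)
--
--
--     result_set = list(result_set)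
--     result_set = sorted(result_set)
--
--     return result_set
-- ===== SOURCE B (Python) =====
-- def k_sum_pairs(int_list, number_k):
--     # One pass with a hash set of previously seen values (O(n) expected + final sort),
--     # pairing only two distinct positions.
--     seen = set()
--     pairs = set()
--     for x in int_list:
--         c = number_k - x
--         if c in seen:
--             pairs.add((c, x) if c <= x else (x, c))
--         seen.add(x)
--     return sorted(pairs)
-- ===== Notes on version B (the rewrite author's own statement) =====
-- stated objective: faster
-- what changed: Replaces the quadratic per-index suffix scan with a single pass that keeps a hash set of previously seen values and pairs each element with its earlier complement, sorting the collected pairs at the end.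
-- intended difference: On lists where some value v with 2*v = number_k occurs exactly once and not only at the last position, A pairs that single occurrence with itself (its suffix check int_list[cur_index:] includes the current element) and returns (v,v) among the pairs, while B only pairs two distinct positions and omits it, which is the intended meaning of a k-sum pair. — e.g. on k_sum_pairs([3, 5], 6): A returns [(3, 3)], B returns []
import Mathlib
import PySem

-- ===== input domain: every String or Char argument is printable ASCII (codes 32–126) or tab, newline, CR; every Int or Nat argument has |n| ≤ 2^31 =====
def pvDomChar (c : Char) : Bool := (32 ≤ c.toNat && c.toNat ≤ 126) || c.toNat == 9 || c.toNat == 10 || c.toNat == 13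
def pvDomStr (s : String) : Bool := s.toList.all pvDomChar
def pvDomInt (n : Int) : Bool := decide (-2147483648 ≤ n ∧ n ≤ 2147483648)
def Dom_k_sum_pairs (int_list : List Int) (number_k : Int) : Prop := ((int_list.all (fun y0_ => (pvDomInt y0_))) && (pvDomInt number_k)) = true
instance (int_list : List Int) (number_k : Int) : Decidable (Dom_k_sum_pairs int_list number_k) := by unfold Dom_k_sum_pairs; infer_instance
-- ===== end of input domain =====

-- B replaces A's quadratic per-index suffix scan with one hash-set pass pairing each element
-- with a previously seen complement (objective: faster); B intentionally omits A's accidental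
-- self-pairs of single occurrences (see D_k_sum_pairs below).

-- ===== PORT A =====
def k_sum_pairs (int_list : List Int) (number_k : Int) : List (Int × Int) :=
  let stop_index : Int := (int_list.length : Int) - 1
  let result_set : PySem.Set (Int × Int) :=
    (PySem.List.pyRange 0 stop_index).foldl (fun result_set cur_index =>
      -- int_list[cur_index]: cur_index comes from range(len-1), always in bounds
      let num_1 := PySem.List.pyGetD int_list cur_index 0
      let num_2 := number_k - num_1
      let remaining_list := PySem.List.slice int_list (some cur_index) none
      if remaining_list.contains num_2 then
        -- tuple(sorted([num_1, num_2])) on a 2-list: the smaller component first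
        let new_sets := if num_1 ≤ num_2 then (num_1, num_2) else (num_2, num_1)
        PySem.Set.add result_set new_sets
      else result_set) PySem.Set.empty
  PySem.List.sorted2 result_set Prod.fst Prod.snd

-- ===== PORT B =====
def k_sum_pairs_alt (int_list : List Int) (number_k : Int) : List (Int × Int) :=
  let st : PySem.Set Int × PySem.Set (Int × Int) :=
    int_list.foldl (fun st x =>
      let c := number_k - x
      let pairs := if PySem.Set.contains st.1 c then
          PySem.Set.add st.2 (if c ≤ x then (c, x) else (x, c))
        else st.2
      (PySem.Set.add st.1 x, pairs)) (PySem.Set.empty, PySem.Set.empty)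
  PySem.List.sorted2 st.2 Prod.fst Prod.snd

-- ===== PRECONDITION & SPEC =====
-- On lists where some value v with 2*v = number_k occurs exactly once and not only at the last
-- position, A pairs that single occurrence with itself (its suffix check int_list[cur_index:]
-- includes the current element) and returns (v,v) among the pairs, while B only pairs two
-- distinct positions and omits it, which is the intended meaning of a k-sum pair.
def D_k_sum_pairs (int_list : List Int) (number_k : Int) : Prop :=
  ∃ v ∈ int_list.dropLast, 2 * v = number_k ∧ int_list.count v = 1
instance (int_list : List Int) (number_k : Int) : Decidable (D_k_sum_pairs int_list number_k) := by
  unfold D_k_sum_pairs; infer_instance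

def Spec_k_sum_pairs (int_list : List Int) (number_k : Int) (out : List (Int × Int)) : Prop :=
  ¬ D_k_sum_pairs int_list number_k → out = k_sum_pairs_alt int_list number_k
instance (int_list : List Int) (number_k : Int) (out : List (Int × Int)) : Decidable (Spec_k_sum_pairs int_list number_k out) := by
  unfold Spec_k_sum_pairs; infer_instance

def pvDiffWitness_k_sum_pairs : List Int × Int := ([3, 5], 6)
def pvDiffWitnessOut_k_sum_pairs : (List (Int × Int)) × (List (Int × Int)) := ([(3, 3)], [])

-- ===== CLAIM (what is proved, stated in full; the proofs are below) =====
def Claim_unchanged_k_sum_pairs : Prop := ∀ (int_list : List Int) (number_k : Int), Dom_k_sum_pairs int_list number_k → Spec_k_sum_pairs int_list number_k (k_sum_pairs int_list number_k)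
def Claim_changed_k_sum_pairs : Prop := Dom_k_sum_pairs (pvDiffWitness_k_sum_pairs.1) (pvDiffWitness_k_sum_pairs.2) ∧ D_k_sum_pairs (pvDiffWitness_k_sum_pairs.1) (pvDiffWitness_k_sum_pairs.2) ∧ k_sum_pairs (pvDiffWitness_k_sum_pairs.1) (pvDiffWitness_k_sum_pairs.2) = pvDiffWitnessOut_k_sum_pairs.1 ∧ k_sum_pairs_alt (pvDiffWitness_k_sum_pairs.1) (pvDiffWitness_k_sum_pairs.2) = pvDiffWitnessOut_k_sum_pairs.2 ∧ pvDiffWitnessOut_k_sum_pairs.1 ≠ pvDiffWitnessOut_k_sum_pairs.2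
def Claim_exact_k_sum_pairs : Prop := ∀ (int_list : List Int) (number_k : Int), Dom_k_sum_pairs int_list number_k → D_k_sum_pairs int_list number_k → k_sum_pairs int_list number_k ≠ k_sum_pairs_alt int_list number_k

-- ===== LEMMAS AND PROOFS =====

-- the sorted 2-tuple both programs build
def pvSp (a b : Int) : Int × Int := if a ≤ b then (a, b) else (b, a)

-- lexicographic ≤ on pairs (what Python's tuple sort orders by)
def pvLexLe (a b : Int × Int) : Prop := a.1 < b.1 ∨ (a.1 = b.1 ∧ a.2 ≤ b.2)

-- the comparison sorted2 … Prod.fst Prod.snd inserts by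
def pvBefore (a b : Int × Int) : Bool :=
  decide (a.1 < b.1) || (!decide (b.1 < a.1) && decide (a.2 < b.2))

lemma pvInsertBy_pairwise (x : Int × Int) (ys : List (Int × Int))
    (h : ys.Pairwise pvLexLe) : (PySem.List.insertBy pvBefore x ys).Pairwise pvLexLe := by
  induction ys with
  | nil => simp [PySem.List.insertBy, pvLexLe]
  | cons y ys ih =>
    rcases List.pairwise_cons.mp h with ⟨hy, hys⟩
    by_cases hb : pvBefore x y = true
    · rw [show PySem.List.insertBy pvBefore x (y :: ys) = x :: y :: ys by
        simp [PySem.List.insertBy, hb]]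
      refine List.pairwise_cons.mpr ⟨?_, h⟩
      intro z hz
      have hxy : pvLexLe x y := by
        unfold pvBefore at hb; unfold pvLexLe
        simp only [Bool.or_eq_true, Bool.and_eq_true, Bool.not_eq_true', decide_eq_true_eq,
          decide_eq_false_iff_not] at hb
        omega
      rcases List.mem_cons.mp hz with rfl | hz
      · exact hxy
      · have := hy z hz
        unfold pvLexLe at *; omega
    · rw [show PySem.List.insertBy pvBefore x (y :: ys) = y :: PySem.List.insertBy pvBefore x ys by
        simp [PySem.List.insertBy, hb]]
      refine List.pairwise_cons.mpr ⟨?_, ih hys⟩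
      intro z hz
      rcases (PySem.List.mem_insertBy pvBefore x z ys).mp hz with rfl | hz
      · unfold pvBefore at hb
        simp only [Bool.or_eq_true, Bool.and_eq_true, Bool.not_eq_true', decide_eq_true_eq,
          decide_eq_false_iff_not] at hb
        unfold pvLexLe; omega
      · exact hy z hz

lemma pvFoldl_insertBy_pairwise (xs acc : List (Int × Int))
    (h : acc.Pairwise pvLexLe) :
    (xs.foldl (fun acc x => PySem.List.insertBy pvBefore x acc) acc).Pairwise pvLexLe := by
  induction xs generalizing acc with
  | nil => simpa using h
  | cons x xs ih => exact ih _ (pvInsertBy_pairwise x acc h)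

lemma pvSorted2_eq_foldl (xs : List (Int × Int)) :
    PySem.List.sorted2 xs Prod.fst Prod.snd =
      xs.foldl (fun acc x => PySem.List.insertBy pvBefore x acc) [] := rfl

lemma pvSorted2_pairwise (xs : List (Int × Int)) :
    (PySem.List.sorted2 xs Prod.fst Prod.snd).Pairwise pvLexLe := by
  rw [pvSorted2_eq_foldl]
  exact pvFoldl_insertBy_pairwise xs [] (by simp)

lemma pvSorted2_eq_of_perm (xs ys : List (Int × Int)) (h : xs.Perm ys) :
    PySem.List.sorted2 xs Prod.fst Prod.snd = PySem.List.sorted2 ys Prod.fst Prod.snd := by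
  apply List.Perm.eq_of_pairwise (le := pvLexLe)
  · intro a b _ _ hab hba
    unfold pvLexLe at hab hba
    apply Prod.ext <;> omega
  · exact pvSorted2_pairwise xs
  · exact pvSorted2_pairwise ys
  · exact ((PySem.List.sorted2_perm xs _ _ _).trans h).trans
      (PySem.List.sorted2_perm ys _ _ _).symm

lemma pvSet_add_nodup {α : Type} [BEq α] [LawfulBEq α] (s : PySem.Set α) (x : α)
    (h : s.Nodup) : (PySem.Set.add s x).Nodup := by
  unfold PySem.Set.add
  split
  · exact h
  · next hc =>
    have hx : x ∉ s := by
      intro hm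
      exact hc (by simpa [PySem.Set.contains] using List.contains_iff_mem.mpr hm)
    rw [List.nodup_append]
    refine ⟨h, by simp, fun a ha b hb hab => hx ?_⟩
    have hbx : b = x := by simpa using hb
    rw [← hbx, ← hab]
    exact ha

-- membership in a conditional-add fold over any index list
lemma pvMem_foldl_add_if {α β : Type} [BEq β] [LawfulBEq β] (xs : List α)
    (P : PySem.Set β) (p : α → Bool) (f : α → β) (y : β) :
    y ∈ xs.foldl (fun acc x => if p x then PySem.Set.add acc (f x) else acc) P ↔
      y ∈ P ∨ ∃ x ∈ xs, p x = true ∧ y = f x := by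
  induction xs generalizing P with
  | nil => simp
  | cons x xs ih =>
    simp only [List.foldl_cons, ih, List.mem_cons]
    cases hpx : p x with
    | true =>
      simp only [if_true, PySem.Set.mem_add]
      constructor
      · rintro ((h | rfl) | ⟨z, hz, hpz, rfl⟩)
        · exact Or.inl h
        · exact Or.inr ⟨x, Or.inl rfl, hpx, rfl⟩
        · exact Or.inr ⟨z, Or.inr hz, hpz, rfl⟩
      · rintro (h | ⟨z, rfl | hz, hpz, rfl⟩)
        · exact Or.inl (Or.inl h)
        · exact Or.inl (Or.inr rfl)
        · exact Or.inr ⟨z, hz, hpz, rfl⟩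
    | false =>
      simp only [Bool.false_eq_true, if_false]
      constructor
      · rintro (h | ⟨z, hz, hpz, rfl⟩)
        · exact Or.inl h
        · exact Or.inr ⟨z, Or.inr hz, hpz, rfl⟩
      · rintro (h | ⟨z, rfl | hz, hpz, rfl⟩)
        · exact Or.inl h
        · exact absurd hpz (by simp [hpx])
        · exact Or.inr ⟨z, hz, hpz, rfl⟩

lemma pvNodup_foldl_add_if {α β : Type} [BEq β] [LawfulBEq β] (xs : List α)
    (P : PySem.Set β) (p : α → Bool) (f : α → β) (h : P.Nodup) :
    (xs.foldl (fun acc x => if p x then PySem.Set.add acc (f x) else acc) P).Nodup := by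
  induction xs generalizing P with
  | nil => simpa using h
  | cons x xs ih =>
    simp only [List.foldl_cons]
    apply ih
    split
    · exact pvSet_add_nodup _ _ h
    · exact h

-- A's set before the final sort
def pvACond (l : List Int) (k : Int) (i : Int) : Bool :=
  (PySem.List.slice l (some i) none).contains (k - PySem.List.pyGetD l i 0)
def pvAPair (l : List Int) (k : Int) (i : Int) : Int × Int :=
  pvSp (PySem.List.pyGetD l i 0) (k - PySem.List.pyGetD l i 0)
def pvASet (l : List Int) (k : Int) : PySem.Set (Int × Int) :=
  (PySem.List.pyRange 0 ((l.length : Int) - 1)).foldl (fun result_set cur_index =>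
    let num_1 := PySem.List.pyGetD l cur_index 0
    let num_2 := k - num_1
    let remaining_list := PySem.List.slice l (some cur_index) none
    if remaining_list.contains num_2 then
      PySem.Set.add result_set (if num_1 ≤ num_2 then (num_1, num_2) else (num_2, num_1))
    else result_set) PySem.Set.empty

lemma pvASet_eq (l : List Int) (k : Int) :
    pvASet l k = (PySem.List.pyRange 0 ((l.length : Int) - 1)).foldl
      (fun acc i => if pvACond l k i then PySem.Set.add acc (pvAPair l k i) else acc)
      PySem.Set.empty := rfl

lemma pvA_eq (l : List Int) (k : Int) :
    k_sum_pairs l k = PySem.List.sorted2 (pvASet l k) Prod.fst Prod.snd := rfl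

lemma pvMemASet (l : List Int) (k : Int) (x : Int × Int) :
    x ∈ pvASet l k ↔ ∃ j : Nat, j + 1 < l.length ∧ (k - l.getD j 0) ∈ l.drop j ∧
      x = pvSp (l.getD j 0) (k - l.getD j 0) := by
  rw [pvASet_eq, pvMem_foldl_add_if]
  simp only [PySem.Set.empty, List.not_mem_nil, false_or]
  constructor
  · rintro ⟨i, hi, hc, rfl⟩
    rw [PySem.List.mem_pyRange_one] at hi
    obtain ⟨j, rfl⟩ := Int.eq_ofNat_of_zero_le hi.1
    unfold pvACond at hc
    rw [PySem.List.slice_from_natCast, PySem.List.pyGetD_natCast] at hc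
    refine ⟨j, ?_, List.contains_iff_mem.mp hc, ?_⟩
    · have h2 := hi.2
      omega
    · unfold pvAPair
      rw [PySem.List.pyGetD_natCast]
  · rintro ⟨j, hj, hm, rfl⟩
    refine ⟨(j : Int), ?_, ?_, ?_⟩
    · rw [PySem.List.mem_pyRange_one]
      constructor
      · exact Int.natCast_nonneg j
      · omega
    · unfold pvACond
      rw [PySem.List.slice_from_natCast, PySem.List.pyGetD_natCast]
      exact List.contains_iff_mem.mpr hm
    · unfold pvAPair
      rw [PySem.List.pyGetD_natCast]

-- B's fold: the seen-set invariant, nodup and membership at once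
def pvBStep (k : Int) : PySem.Set Int × PySem.Set (Int × Int) → Int → PySem.Set Int × PySem.Set (Int × Int) :=
  fun st x =>
    let c := k - x
    let pairs := if PySem.Set.contains st.1 c then
        PySem.Set.add st.2 (if c ≤ x then (c, x) else (x, c))
      else st.2
    (PySem.Set.add st.1 x, pairs)

lemma pvB_eq (l : List Int) (k : Int) :
    k_sum_pairs_alt l k =
      PySem.List.sorted2 (l.foldl (pvBStep k) (PySem.Set.empty, PySem.Set.empty)).2 Prod.fst Prod.snd := rfl

lemma pvBFold_inv (l : List Int) (k : Int) (s : PySem.Set Int) (P : PySem.Set (Int × Int)) :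
    (P.Nodup → (l.foldl (pvBStep k) (s, P)).2.Nodup) ∧
    (∀ x, x ∈ (l.foldl (pvBStep k) (s, P)).2 ↔ x ∈ P ∨ ∃ j : Nat, j < l.length ∧
      ((k - l.getD j 0) ∈ s ∨ (k - l.getD j 0) ∈ l.take j) ∧
      x = pvSp (k - l.getD j 0) (l.getD j 0)) := by
  induction l generalizing s P with
  | nil =>
    simp
  | cons b t ih =>
    have hstep : pvBStep k (s, P) b =
        (PySem.Set.add s b,
         if PySem.Set.contains s (k - b) then PySem.Set.add P (pvSp (k - b) b) else P) := rfl
    simp only [List.foldl_cons, hstep]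
    obtain ⟨ihN, ihM⟩ := ih (PySem.Set.add s b)
      (if PySem.Set.contains s (k - b) then PySem.Set.add P (pvSp (k - b) b) else P)
    constructor
    · intro hP
      apply ihN
      split
      · exact pvSet_add_nodup _ _ hP
      · exact hP
    · intro x
      rw [ihM x]
      have hP' : x ∈ (if PySem.Set.contains s (k - b) then PySem.Set.add P (pvSp (k - b) b) else P) ↔
          x ∈ P ∨ (PySem.Set.contains s (k - b) = true ∧ x = pvSp (k - b) b) := by
        split
        · next hc => rw [PySem.Set.mem_add]; tauto
        · next hc =>
            have hns : (k - b) ∉ s := fun hm => hc (List.contains_iff_mem.mpr hm)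
            simp [hns]
      rw [hP']
      have hmem : ∀ y : Int, y ∈ PySem.Set.add s b ↔ y ∈ s ∨ y = b := fun y => PySem.Set.mem_add s b y
      have hcont : PySem.Set.contains s (k - b) = true ↔ (k - b) ∈ s := List.contains_iff_mem
      constructor
      · rintro ((h | ⟨hc, rfl⟩) | ⟨j, hj, hin, rfl⟩)
        · exact Or.inl h
        · exact Or.inr ⟨0, by simp, Or.inl (by simpa using hcont.mp hc), by simp⟩
        · refine Or.inr ⟨j + 1, by simpa using hj, ?_,
            by simp only [List.getD_cons_succ]⟩
          simp only [List.getD_cons_succ, List.take_succ_cons, List.mem_cons]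
          rcases hin with hin | hin
          · rcases (hmem _).mp hin with h | h
            · exact Or.inl h
            · exact Or.inr (Or.inl h)
          · exact Or.inr (Or.inr hin)
      · rintro (h | ⟨j, hj, hin, rfl⟩)
        · exact Or.inl (Or.inl h)
        · cases j with
          | zero =>
            simp only [List.getD_cons_zero, List.take_zero, List.not_mem_nil, or_false] at hin ⊢
            exact Or.inl (Or.inr ⟨hcont.mpr hin, by simp⟩)
          | succ j =>
            refine Or.inr ⟨j, by simpa using hj, ?_,
              by simp only [List.getD_cons_succ]⟩
            simp only [List.getD_cons_succ, List.take_succ_cons, List.mem_cons] at hin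
            rcases hin with hin | hin | hin
            · exact Or.inl ((hmem _).mpr (Or.inl hin))
            · exact Or.inl ((hmem _).mpr (Or.inr hin))
            · exact Or.inr hin

lemma pvTwoLeCount (l : List Int) (v : Int) (h : 1 < l.count v) :
    ∃ i j : Nat, i < j ∧ j < l.length ∧ l.getD i 0 = v ∧ l.getD j 0 = v := by
  induction l with
  | nil => simp at h
  | cons b t ih =>
    by_cases hb : b = v
    · subst hb
      have hpos : 0 < t.count b := by
        rw [List.count_cons, if_pos (by simp : (b == b) = true)] at h
        omega
      obtain ⟨j, hj, hje⟩ := List.mem_iff_getElem.mp (List.count_pos_iff.mp hpos)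
      refine ⟨0, j + 1, by omega, by simpa using hj, by simp, ?_⟩
      rw [List.getD_cons_succ, List.getD_eq_getElem _ _ hj]
      exact hje
    · have ht : 1 < t.count v := by
        rw [List.count_cons] at h
        simp [show ¬ (b == v) = true by simpa using hb] at h
        exact h
      obtain ⟨i, j, hij, hj, hi, hjv⟩ := ih ht
      exact ⟨i + 1, j + 1, by omega, by simpa using hj, by simpa using hi,
        by simpa using hjv⟩

-- the bridge between the two characterizations, outside D_
lemma pvBridge (l : List Int) (k : Int) (hD : ¬ D_k_sum_pairs l k) (x : Int × Int) :
    (∃ j : Nat, j + 1 < l.length ∧ (k - l.getD j 0) ∈ l.drop j ∧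
      x = pvSp (l.getD j 0) (k - l.getD j 0)) ↔
    (∃ j : Nat, j < l.length ∧ (k - l.getD j 0) ∈ l.take j ∧
      x = pvSp (k - l.getD j 0) (l.getD j 0)) := by
  constructor
  · rintro ⟨j, hj1, hm, rfl⟩
    obtain ⟨m, hmlt, hme⟩ := List.mem_iff_getElem.mp hm
    rw [List.getElem_drop] at hme
    have hjlen : j < l.length := by omega
    have hjm : j + m < l.length := by
      simp only [List.length_drop] at hmlt
      omega
    have hgd : l.getD j 0 = l[j] := List.getD_eq_getElem l 0 hjlen
    rcases Nat.eq_zero_or_pos m with rfl | hmpos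
    · -- A's self-pair: l[j] = k - l[j]; outside D_ the value must occur twice
      have h2v : 2 * l.getD j 0 = k := by
        rw [hgd]
        have : l[j + 0] = l[j] := by simp
        rw [this] at hme
        rw [hgd] at hme
        omega
      have hvmem : l.getD j 0 ∈ l.dropLast := by
        rw [List.dropLast_eq_take]
        refine List.mem_iff_getElem.mpr ⟨j, ?_, ?_⟩
        · simp only [List.length_take]
          omega
        · rw [List.getElem_take]
          exact hgd.symm
      have hcount : l.count (l.getD j 0) ≠ 1 := fun hc => hD ⟨l.getD j 0, hvmem, h2v, hc⟩
      have hpos : 0 < l.count (l.getD j 0) :=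
        List.count_pos_iff.mpr (by rw [hgd]; exact List.getElem_mem hjlen)
      obtain ⟨i1, j1, hij, hjl, hi1, hj1v⟩ := pvTwoLeCount l (l.getD j 0) (by omega)
      have hk : k - l.getD j1 0 = l.getD j 0 := by rw [hj1v]; omega
      refine ⟨j1, hjl, ?_, ?_⟩
      · rw [hk]
        refine List.mem_iff_getElem.mpr ⟨i1, ?_, ?_⟩
        · simp only [List.length_take]
          omega
        · rw [List.getElem_take]
          rw [← List.getD_eq_getElem l 0 (by omega : i1 < l.length)]
          exact hi1
      · rw [hk, hj1v]
        have hkk : k - l.getD j 0 = l.getD j 0 := by omega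
        rw [hkk]
    · -- two distinct positions j < j + m
      have hge : l.getD (j + m) 0 = l[j + m] := List.getD_eq_getElem l 0 hjm
      have hk : k - l.getD (j + m) 0 = l.getD j 0 := by
        rw [hge, hme, hgd]
        omega
      refine ⟨j + m, hjm, ?_, ?_⟩
      · rw [hk]
        refine List.mem_iff_getElem.mpr ⟨j, ?_, ?_⟩
        · simp only [List.length_take]
          omega
        · rw [List.getElem_take]
          exact hgd.symm
      · rw [hk, hge, hme, hgd]
  · rintro ⟨j, hj, hm, rfl⟩
    obtain ⟨i, hilt, hie⟩ := List.mem_iff_getElem.mp hm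
    rw [List.getElem_take] at hie
    have hij : i < j := by
      simp only [List.length_take] at hilt
      omega
    have hgi : l.getD i 0 = l[i] := List.getD_eq_getElem l 0 (by omega)
    have hk : k - l.getD i 0 = l.getD j 0 := by
      rw [hgi, hie]
      omega
    refine ⟨i, by omega, ?_, ?_⟩
    · rw [hk]
      refine List.mem_iff_getElem.mpr ⟨j - i, ?_, ?_⟩
      · simp only [List.length_drop]
        omega
      · rw [List.getElem_drop, ← List.getD_eq_getElem l 0 (by omega : i + (j - i) < l.length)]
        congr 1
        omega
    · rw [hk, hgi, hie]

-- ===== VERDICT (by name: the statement is the Claim_ definition above) =====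
theorem k_sum_pairs_spec : Claim_unchanged_k_sum_pairs := by
  intro l k _ hD
  rw [pvA_eq, pvB_eq]
  apply pvSorted2_eq_of_perm
  rw [pvASet_eq]
  rw [List.perm_ext_iff_of_nodup
    (pvNodup_foldl_add_if _ _ _ _ (by simp [PySem.Set.empty]))
    ((pvBFold_inv l k PySem.Set.empty PySem.Set.empty).1 (by simp [PySem.Set.empty]))]
  intro x
  rw [← pvASet_eq, pvMemASet, (pvBFold_inv l k PySem.Set.empty PySem.Set.empty).2 x]
  simp only [PySem.Set.empty, List.not_mem_nil, false_or]
  exact pvBridge l k hD x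

theorem k_sum_pairs_changed : Claim_changed_k_sum_pairs := by
  unfold Claim_changed_k_sum_pairs; decide

theorem k_sum_pairs_tight : Claim_exact_k_sum_pairs := by
  intro l k _ hD heq
  obtain ⟨v, hvmem, h2v, hcount⟩ := hD
  -- the self-pair (v, v) is in A's result …
  have hA : (v, v) ∈ k_sum_pairs l k := by
    rw [pvA_eq, (PySem.List.sorted2_perm (pvASet l k) Prod.fst Prod.snd false).mem_iff]
    rw [List.dropLast_eq_take] at hvmem
    obtain ⟨j, hjlt, hje⟩ := List.mem_iff_getElem.mp hvmem
    rw [List.getElem_take] at hje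
    have hjlen : j + 1 < l.length := by
      simp only [List.length_take] at hjlt
      omega
    have hgd : l.getD j 0 = v := by
      rw [List.getD_eq_getElem l 0 (by omega)]
      exact hje
    refine (pvMemASet l k (v, v)).mpr ⟨j, hjlen, ?_, ?_⟩
    · rw [hgd, show k - v = v by omega]
      refine List.mem_iff_getElem.mpr ⟨0, ?_, ?_⟩
      · simp only [List.length_drop]
        omega
      · rw [List.getElem_drop]
        simpa using hje
    · rw [hgd, show k - v = v by omega]
      simp [pvSp]
  -- … but not in B's
  have hB : (v, v) ∉ k_sum_pairs_alt l k := by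
    intro hmem
    rw [pvB_eq, (PySem.List.sorted2_perm _ Prod.fst Prod.snd false).mem_iff,
      (pvBFold_inv l k PySem.Set.empty PySem.Set.empty).2 (v, v)] at hmem
    rcases hmem with hmem | ⟨j, hj, hin, hsp⟩
    · simp [PySem.Set.empty] at hmem
    · have hgv : l.getD j 0 = v := by
        unfold pvSp at hsp
        split_ifs at hsp <;> rw [Prod.mk.injEq] at hsp <;> omega
      have hin' : v ∈ l.take j := by
        rw [show k - l.getD j 0 = v by omega] at hin
        rcases hin with hin | hin
        · simp [PySem.Set.empty] at hin
        · exact hin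
      have hjv : l[j] = v := by
        rw [← List.getD_eq_getElem l 0 hj]
        exact hgv
      have hsplit : l.count v = (l.take j).count v + (l.drop j).count v := by
        rw [← List.count_append, List.take_append_drop]
      have h1 : 0 < (l.take j).count v := List.count_pos_iff.mpr hin'
      have h2 : 0 < (l.drop j).count v := by
        rw [List.drop_eq_getElem_cons hj, hjv, List.count_cons,
          if_pos (by simp : (v == v) = true)]
        omega
      omega
  exact hB (heq ▸ hA)
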